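-- pv_equiv track=rewrite | github.com/sarahapplebaum/NewCaptionApp | OLD_FILES_TO_DELETE/test_runner.py | _check_line_limit
-- ===== SOURCE A (Python) =====
-- def _check_line_limit(vtt_content: str) -> int:
--     """Check maximum lines per subtitle"""
--     max_lines = 0
--     lines = vtt_content.split('\n')
--
--     i = 0
--     while i < len(lines):
--         if '-->' in lines[i]:
--             i += 1
--             line_count = 0
--             while i < len(lines) and lines[i].strip():
--                 line_count += 1
--                 i += 1
--             max_lines = max(max_lines, line_count)
--         else:
--             i += 1
--
--     return max_lines
-- ===== SOURCE B (Python) =====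
-- def _check_line_limit(vtt_content: str) -> int:
--     """Check maximum lines per subtitle"""
--     # Stage 1: group the lines into maximal blocks of non-blank lines.
--     blocks = []
--     current = []
--     for line in vtt_content.split('\n'):
--         if line.strip():
--             current.append(line)
--         else:
--             if current:
--                 blocks.append(current)
--             current = []
--     if current:
--         blocks.append(current)
--     # Stage 2: a block's cue size is the number of lines after its first timing marker.
--     best = 0
--     for block in blocks:
--         for k, line in enumerate(block):
--             if '-->' in line:
--                 best = max(best, len(block) - k - 1)
--                 break
--     return best
-- ===== Notes on version B (the rewrite author's own statement) =====
-- stated objective: alternative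
-- what changed: Replaced A's index-driven nested while loops by a two-stage algorithm: first group the lines into maximal blocks of non-blank lines, then take the maximum over blocks of (block length - 1 - index of the block's first '-->' line).
import Mathlib
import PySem

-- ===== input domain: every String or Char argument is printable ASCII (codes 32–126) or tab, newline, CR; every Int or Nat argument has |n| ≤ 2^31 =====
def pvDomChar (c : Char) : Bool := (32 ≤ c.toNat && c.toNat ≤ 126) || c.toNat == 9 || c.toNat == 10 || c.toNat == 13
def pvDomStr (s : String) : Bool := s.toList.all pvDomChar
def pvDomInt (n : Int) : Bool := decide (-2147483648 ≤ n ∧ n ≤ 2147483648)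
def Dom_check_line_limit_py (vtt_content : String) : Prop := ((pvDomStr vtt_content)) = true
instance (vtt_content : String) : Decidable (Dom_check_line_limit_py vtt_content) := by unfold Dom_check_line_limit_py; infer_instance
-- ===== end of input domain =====

-- B replaces A's nested index-driven scan by a staged algorithm: group lines into
-- maximal non-blank blocks, then maximise (block length - 1 - first marker index)
-- over the blocks; objective: alternative (same cost, different decomposition).

-- ===== PORT A =====
-- A's inner while: consume nonempty (after strip) lines, returning the updated line_count
-- and the remaining suffix (exactly the i/line_count state of the Python inner loop).
def pyInnerA : List String → Int → Int × List String
  | [], c => (c, [])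
  | l :: rest, c =>
    if PySem.Str.strip l ≠ "" then pyInnerA rest (c + 1) else (c, l :: rest)

-- A's outer while over the remaining suffix of lines; the Nat argument is pure fuel making
-- the recursion structural (each step drops at least one line, so fuel = number of lines suffices).
def pyOuterA : Nat → List String → Int → Int
  | 0, _, m => m
  | _ + 1, [], m => m
  | fuel + 1, l :: rest, m =>
    if PySem.Str.isIn "-->" l then
      let p := pyInnerA rest 0
      pyOuterA fuel p.2 (max m p.1)
    else
      pyOuterA fuel rest m

def check_line_limit_py (vtt_content : String) : Int :=
  let lines := (PySem.Str.split? vtt_content "\n").getD []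
  pyOuterA lines.length lines 0

-- ===== PORT B =====
-- Stage 1 of Source B: group the lines into maximal blocks of non-blank lines
-- (the accumulator `cur` is the Python variable `current`; blocks are emitted in order).
def mkBlocks : List String → List String → List (List String)
  | [], cur => if cur.isEmpty then [] else [cur]
  | l :: rest, cur =>
    if PySem.Str.strip l ≠ "" then mkBlocks rest (cur ++ [l])
    else if cur.isEmpty then mkBlocks rest [] else cur :: mkBlocks rest []

-- Source B's inner `for k, line in enumerate(block): if '-->' in line: …; break`:
-- the index of the first line containing '-->'.
def firstMarker : List String → Option Nat
  | [] => none
  | l :: rest => if PySem.Str.isIn "-->" l then some 0 else (firstMarker rest).map (· + 1)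

-- one step of Source B's stage-2 loop over blocks
def bestStep (m : Int) (b : List String) : Int :=
  match firstMarker b with
  | some k => max m ((b.length : Int) - (k : Int) - 1)
  | none => m

def check_line_limit_py_alt (vtt_content : String) : Int :=
  let blocks := mkBlocks ((PySem.Str.split? vtt_content "\n").getD []) []
  blocks.foldl bestStep 0

-- ===== PRECONDITION & SPEC =====
def Spec_check_line_limit_py (vtt_content : String) (out : Int) : Prop := out = check_line_limit_py_alt vtt_content
instance (vtt_content : String) (out : Int) : Decidable (Spec_check_line_limit_py vtt_content out) := by unfold Spec_check_line_limit_py; infer_instance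

-- ===== CLAIM (what is proved, stated in full; the proofs are below) =====
def Claim_equal_check_line_limit_py : Prop := ∀ (vtt_content : String), Dom_check_line_limit_py vtt_content → Spec_check_line_limit_py vtt_content (check_line_limit_py vtt_content)

-- ===== LEMMAS AND PROOFS =====

-- the Bool form of "line.strip() is truthy"
def nb (l : String) : Bool := decide (PySem.Str.strip l ≠ "")

-- a list whose strip is empty consists of whitespace only
theorem strip_nil_all_space (cs : List Char) (h : PySem.Chars.strip cs = []) :
    ∀ c ∈ cs, PySem.Chars.isspace c = true := by
  simp only [PySem.Chars.strip, PySem.Chars.lstrip, PySem.Chars.rstrip] at h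
  have h2 : List.dropWhile PySem.Chars.isspace
      (List.dropWhile PySem.Chars.isspace cs).reverse = [] := by
    rwa [List.reverse_eq_nil_iff] at h
  rw [List.dropWhile_eq_nil_iff] at h2
  intro c hc
  have hsplit := List.takeWhile_append_dropWhile (p := PySem.Chars.isspace) (l := cs)
  rw [← hsplit] at hc
  rcases List.mem_append.mp hc with h3 | h3
  · exact List.mem_takeWhile_imp h3
  · exact h2 c (List.mem_reverse.mpr h3)

-- a line containing '-->' is not blank after strip
theorem marker_nonblank (l : String) (hM : PySem.Str.isIn "-->" l = true) :
    PySem.Str.strip l ≠ "" := by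
  intro hS
  have hinf : ("-->".toList) <:+: l.toList := (PySem.Str.isIn_iff_infix _ _).mp hM
  have hmem : '-' ∈ l.toList := hinf.subset (by simp)
  have hstrip : PySem.Chars.strip l.toList = [] := by
    have := congrArg String.toList hS
    simpa [PySem.Str.toList_strip] using this
  have := strip_nil_all_space l.toList hstrip '-' hmem
  simp [PySem.Chars.isspace] at this

-- the inner while loop counts the maximal run of non-blank lines
theorem pyInnerA_eq (ls : List String) : ∀ c : Int,
    pyInnerA ls c = (c + ((ls.takeWhile nb).length : Int), ls.dropWhile nb) := by
  induction ls with
  | nil => intro c; simp [pyInnerA]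
  | cons l rest ih =>
    intro c
    by_cases h : PySem.Str.strip l = ""
    · simp [pyInnerA, h, nb]
    · simp only [pyInnerA, if_pos (by exact h), List.takeWhile_cons, List.dropWhile_cons]
      simp only [nb, decide_eq_true_eq]
      rw [if_pos h, if_pos h, ih (c + 1)]
      simp only [Prod.mk.injEq, List.length_cons]
      exact ⟨by push_cast; ring, trivial⟩

theorem pyOuterA_nil (fuel : Nat) (m : Int) : pyOuterA fuel [] m = m := by
  cases fuel <;> simp [pyOuterA]

theorem firstMarker_lt (b : List String) : ∀ k, firstMarker b = some k → k < b.length := by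
  induction b with
  | nil => intro k h; simp [firstMarker] at h
  | cons l rest ih =>
    intro k h
    simp only [firstMarker] at h
    by_cases hM : PySem.Str.isIn "-->" l = true
    · rw [if_pos hM] at h
      cases h
      simp
    · rw [if_neg (by simpa using hM)] at h
      cases hk : firstMarker rest with
      | none => rw [hk] at h; simp at h
      | some j =>
        rw [hk] at h
        simp only [Option.map_some, Option.some.injEq] at h
        have := ih j hk
        simp only [List.length_cons]
        omega

theorem bestStep_nonneg (m : Int) (b : List String) (hm : 0 ≤ m) : 0 ≤ bestStep m b := by
  unfold bestStep
  cases hk : firstMarker b with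
  | none => exact hm
  | some k => simp; omega

theorem foldl_bestStep_nonneg (bs : List (List String)) : ∀ m : Int, 0 ≤ m → 0 ≤ bs.foldl bestStep m := by
  induction bs with
  | nil => intro m hm; simpa using hm
  | cons b bs ih => intro m hm; exact ih _ (bestStep_nonneg m b hm)

-- the running max in stage 2 factors out of the fold
theorem foldl_bestStep_max (bs : List (List String)) : ∀ m : Int, 0 ≤ m →
    bs.foldl bestStep m = max m (bs.foldl bestStep 0) := by
  induction bs with
  | nil => intro m hm; simp; omega
  | cons b bs ih =>
    intro m hm
    have hF : 0 ≤ bs.foldl bestStep (bestStep 0 b) :=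
      foldl_bestStep_nonneg bs _ (bestStep_nonneg 0 b le_rfl)
    simp only [List.foldl_cons]
    rw [ih (bestStep m b) (bestStep_nonneg m b hm),
        ih (bestStep 0 b) (bestStep_nonneg 0 b le_rfl)]
    have hF0 : 0 ≤ bs.foldl bestStep 0 := foldl_bestStep_nonneg bs 0 le_rfl
    cases hk : firstMarker b with
    | none => simp only [bestStep, hk]; omega
    | some k =>
      have := firstMarker_lt b k hk
      simp only [bestStep, hk]
      omega

theorem mkBlocks_blank (l : String) (rest : List String) (h : PySem.Str.strip l = "") :
    mkBlocks (l :: rest) [] = mkBlocks rest [] := by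
  simp [mkBlocks, h]

-- with a non-empty accumulator, mkBlocks emits (cur ++ leading run) and restarts after it
theorem mkBlocks_run (rest : List String) : ∀ cur : List String, cur ≠ [] →
    mkBlocks rest cur = (cur ++ rest.takeWhile nb) :: mkBlocks (rest.dropWhile nb) [] := by
  induction rest with
  | nil =>
    intro cur hcur
    simp [mkBlocks, List.isEmpty_iff, hcur]
  | cons x xs ih =>
    intro cur hcur
    by_cases h : PySem.Str.strip x = ""
    · have hnb : nb x = false := by simp [nb, h]
      simp only [mkBlocks, List.takeWhile_cons, List.dropWhile_cons, hnb]
      rw [if_neg (not_not_intro h), if_neg (by simp [List.isEmpty_iff, hcur])]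
      simp only [Bool.false_eq_true, if_false, List.append_nil]
      rw [mkBlocks_blank x xs h]
    · have hnb : nb x = true := by simp [nb, h]
      simp only [mkBlocks, List.takeWhile_cons, List.dropWhile_cons, hnb]
      rw [if_pos (by exact h)]
      rw [ih (cur ++ [x]) (by simp)]
      simp

-- skipping a markerless line does not change the stage-2 result
theorem skip_line (l : String) (rest : List String) (hM : PySem.Str.isIn "-->" l = false) :
    (mkBlocks (l :: rest) []).foldl bestStep 0 = (mkBlocks rest []).foldl bestStep 0 := by
  have hM2 : PySem.Chars.isIn ['-', '-', '>'] l.toList = false := by simpa using hM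
  by_cases hS : PySem.Str.strip l = ""
  · rw [mkBlocks_blank l rest hS]
  · have h1 : mkBlocks (l :: rest) [] = mkBlocks rest [l] := by
      simp only [mkBlocks]; rw [if_pos hS]; rfl
    rw [h1, mkBlocks_run rest [l] (by simp)]
    cases hrest : rest with
    | nil =>
      simp only [List.takeWhile_nil, List.dropWhile_nil, List.append_nil]
      simp [List.foldl_cons, bestStep, firstMarker, hM2]
    | cons r rs =>
      by_cases hr : nb r = true
      · -- the leading run of rest is non-empty: rest's first block is r :: takeWhile rs
        have h2 : mkBlocks (r :: rs) [] = mkBlocks rs [r] := by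
          simp only [mkBlocks]
          rw [if_pos (by simpa [nb] using hr)]; rfl
        rw [h2, mkBlocks_run rs [r] (by simp)]
        simp only [List.takeWhile_cons, List.dropWhile_cons, hr, List.singleton_append,
          if_true, List.foldl_cons]
        rw [foldl_bestStep_max _ _ (bestStep_nonneg 0 _ le_rfl),
            foldl_bestStep_max _ _ (bestStep_nonneg 0 _ le_rfl)]
        have hfm : firstMarker (l :: r :: List.takeWhile nb rs)
            = (firstMarker (r :: List.takeWhile nb rs)).map (· + 1) := by
          simp [firstMarker, hM2]
        have hbs : bestStep 0 (l :: r :: List.takeWhile nb rs)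
            = bestStep 0 (r :: List.takeWhile nb rs) := by
          cases hk : firstMarker (r :: List.takeWhile nb rs) with
          | none => simp [bestStep, hfm, hk]
          | some k =>
            have hlt := firstMarker_lt _ k hk
            simp only [bestStep, hfm, hk, Option.map_some, List.length_cons] at hlt ⊢
            push_cast
            omega
        rw [hbs]
      · -- rest starts blank (or is handled below): leading run empty, drop = rest
        have hr' : nb r = false := by simpa using hr
        simp only [List.takeWhile_cons, List.dropWhile_cons, hr', Bool.false_eq_true, if_false,
          List.append_nil, List.foldl_cons]
        rw [foldl_bestStep_max _ _ (bestStep_nonneg 0 _ le_rfl)]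
        have : bestStep 0 [l] = 0 := by simp [bestStep, firstMarker, hM2]
        rw [this]
        have := foldl_bestStep_nonneg (mkBlocks (r :: rs) []) 0 le_rfl
        omega

-- main invariant: A's outer loop computes max of m and B's staged result
theorem outer_eq (n : Nat) : ∀ ls : List String, ls.length ≤ n → ∀ fuel : Nat, ls.length ≤ fuel →
    ∀ m : Int, 0 ≤ m → pyOuterA fuel ls m = max m ((mkBlocks ls []).foldl bestStep 0) := by
  induction n with
  | zero =>
    intro ls hn fuel _ m hm
    have : ls = [] := List.eq_nil_of_length_eq_zero (Nat.le_zero.mp hn)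
    subst this
    simp [pyOuterA_nil, mkBlocks]
    omega
  | succ n ih =>
    intro ls hn fuel hf m hm
    cases ls with
    | nil => simp [pyOuterA_nil, mkBlocks]; omega
    | cons l rest =>
      simp only [List.length_cons] at hn hf
      cases fuel with
      | zero => omega
      | succ f =>
        by_cases hM : PySem.Str.isIn "-->" l = true
        · -- marker line: A runs the inner loop on rest
          have hS : PySem.Str.strip l ≠ "" := marker_nonblank l hM
          simp only [pyOuterA, hM, if_true]
          rw [pyInnerA_eq rest 0]
          have hdlen : (rest.dropWhile nb).length ≤ rest.length :=
            List.length_dropWhile_le _ _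
          rw [ih (rest.dropWhile nb) (by omega) f (by omega) _ (by
            have := le_max_left m (0 + ((rest.takeWhile nb).length : Int)); omega)]
          have h1 : mkBlocks (l :: rest) [] = mkBlocks rest [l] := by
            simp only [mkBlocks]; rw [if_pos hS]; rfl
          rw [h1, mkBlocks_run rest [l] (by simp), List.singleton_append, List.foldl_cons]
          rw [foldl_bestStep_max _ _ (bestStep_nonneg 0 _ le_rfl)]
          have hbs : bestStep 0 (l :: rest.takeWhile nb) = ((rest.takeWhile nb).length : Int) := by
            simp only [bestStep, firstMarker, hM, if_true, List.length_cons]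
            push_cast
            omega
          rw [hbs]
          have hF : 0 ≤ (mkBlocks (rest.dropWhile nb) []).foldl bestStep 0 :=
            foldl_bestStep_nonneg _ 0 le_rfl
          omega
        · -- no marker: A skips the line, B's result is unchanged
          have hM' : PySem.Str.isIn "-->" l = false := by simpa using hM
          simp only [pyOuterA, hM', Bool.false_eq_true, if_false]
          rw [ih rest (by omega) f (by omega) m hm, skip_line l rest hM']

-- ===== VERDICT (by name: the statement is the Claim_ definition above) =====
theorem check_line_limit_py_spec : Claim_equal_check_line_limit_py := by
  intro vtt _
  simp only [Spec_check_line_limit_py, check_line_limit_py, check_line_limit_py_alt]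
  rw [outer_eq _ _ le_rfl _ le_rfl 0 le_rfl]
  have := foldl_bestStep_nonneg (mkBlocks ((PySem.Str.split? vtt "\n").getD []) []) 0 le_rfl
  omega
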